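-- pv_equiv track=rewrite | github.com/Estphu/Python_algorithms | grid_searching_test.py | count_matched_regions
-- ===== SOURCE A (Python) =====
-- def find_connected_regions(grid):
--     def dfs(row, col, grid, visited, region):
--         if row < 0 or row >= len(grid) or col < 0 or col >= len(grid[0]) or grid[row][col] == 0 or visited[row][col]:
--             return
--         visited[row][col] = True
--         region.append((row, col))
--         # Explore adjacent cells
--         dfs(row - 1, col, grid, visited, region)
--         dfs(row + 1, col, grid, visited, region)
--         dfs(row, col - 1, grid, visited, region)
--         dfs(row, col + 1, grid, visited, region)
--
--     def get_regions(grid):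
--         rows, cols = len(grid), len(grid[0])
--         visited = [[False] * cols for _ in range(rows)]
--         regions = []
--         for row in range(rows):
--             for col in range(cols):
--                 if grid[row][col] == 1 and not visited[row][col]:
--                     region = []
--                     dfs(row, col, grid, visited, region)
--                     regions.append(region)
--         return regions
--
--     return get_regions(grid)
--
-- def count_matched_regions(grid1, grid2):
--     # Step 1: Identify connected regions in both grids
--     regions1 = find_connected_regions(grid1)
--     regions2 = find_connected_regions(grid2)
--
--     def regions_match(region1, region2):
--         return set(region1) == set(region2)
--
--     # Step 3: Initialize a counter for matched regions
--     matched_count = 0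
--
--     # Step 4: Compare regions from the first grid with the second grid
--     for region1 in regions1:
--         for region2 in regions2:
--             if regions_match(region1, region2):
--                 matched_count += 1
--
--     # Step 5: Return the count of matched regions
--     return matched_count
-- ===== SOURCE B (Python) =====
-- def count_matched_regions(grid1, grid2):
--     def regions_of(grid):
--         rows, cols = len(grid), len(grid[0])
--         visited = [[False] * cols for _ in range(rows)]
--         regions = []
--         for sr in range(rows):
--             for sc in range(cols):
--                 if grid[sr][sc] == 1 and not visited[sr][sc]:
--                     region = []
--                     stack = [(sr, sc)]
--                     while stack:
--                         r, c = stack.pop()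
--                         if 0 <= r < rows and 0 <= c < cols and grid[r][c] != 0 and not visited[r][c]:
--                             visited[r][c] = True
--                             region.append((r, c))
--                             stack.extend(((r, c + 1), (r, c - 1), (r + 1, c), (r - 1, c)))
--                     regions.append(region)
--         return regions
--
--     counts2 = {}
--     for region in regions_of(grid2):
--         key = tuple(sorted(set(region)))
--         counts2[key] = counts2.get(key, 0) + 1
--     return sum(counts2.get(tuple(sorted(set(region))), 0)
--                for region in regions_of(grid1))
-- ===== Notes on version B (the rewrite author's own statement) =====
-- stated objective: alternative
-- what changed: B finds regions with an explicit-stack flood fill instead of A's recursive DFS, and counts matches by building a counter keyed by each region's sorted cell set and looking each region of grid1 up once, instead of A's nested loop comparing every region pair by set equality.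
import Mathlib
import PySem

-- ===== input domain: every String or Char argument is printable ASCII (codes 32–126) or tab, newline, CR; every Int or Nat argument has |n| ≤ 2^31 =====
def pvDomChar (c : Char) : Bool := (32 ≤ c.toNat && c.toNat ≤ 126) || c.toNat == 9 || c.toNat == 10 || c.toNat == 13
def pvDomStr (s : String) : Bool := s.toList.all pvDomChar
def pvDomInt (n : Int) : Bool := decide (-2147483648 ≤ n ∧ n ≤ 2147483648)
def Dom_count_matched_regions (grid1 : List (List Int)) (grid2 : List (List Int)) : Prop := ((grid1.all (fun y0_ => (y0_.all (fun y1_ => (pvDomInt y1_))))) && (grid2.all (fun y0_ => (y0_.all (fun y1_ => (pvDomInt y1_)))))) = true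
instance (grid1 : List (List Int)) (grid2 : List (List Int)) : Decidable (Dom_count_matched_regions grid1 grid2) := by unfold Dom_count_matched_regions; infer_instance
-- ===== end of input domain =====

-- B finds regions with an explicit-stack flood fill instead of A's recursive DFS,
-- and counts matches via a counter keyed by each region's sorted cell set instead
-- of comparing every region pair by set equality.

-- ===== PORT A =====
-- shared accessors: grid[r][c], visited[r][c], visited[r][c] = True
def pvGridAt (grid : List (List Int)) (r c : Int) : Int :=
  PySem.List.pyGetD (PySem.List.pyGetD grid r []) c 0

def pvVisAt (v : List (List Bool)) (r c : Int) : Bool :=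
  PySem.List.pyGetD (PySem.List.pyGetD v r []) c false

def pvVisSet (v : List (List Bool)) (r c : Int) : List (List Bool) :=
  PySem.List.pySetD v r (PySem.List.pySetD (PySem.List.pyGetD v r []) c true)

-- A's recursive dfs; the fuel only makes the recursion total (it is never
-- exhausted at the fuel value the caller passes)
def pvDfs (grid : List (List Int)) :
    Nat → Int → Int → List (List Bool) × List (Int × Int) →
    List (List Bool) × List (Int × Int)
  | 0, _, _, vr => vr
  | fuel + 1, row, col, vr =>
    if row < 0 ∨ row ≥ PySem.List.len grid ∨ col < 0 ∨
        col ≥ PySem.List.len (PySem.List.pyGetD grid 0 []) ∨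
        pvGridAt grid row col = 0 ∨ pvVisAt vr.1 row col = true then
      vr
    else
      let st1 := (pvVisSet vr.1 row col, vr.2 ++ [(row, col)])
      let s1 := pvDfs grid fuel (row - 1) col st1
      let s2 := pvDfs grid fuel (row + 1) col s1
      let s3 := pvDfs grid fuel row (col - 1) s2
      pvDfs grid fuel row (col + 1) s3

def pvGetRegions (grid : List (List Int)) : List (List (Int × Int)) :=
  let rows := PySem.List.len grid
  let cols := PySem.List.len (PySem.List.pyGetD grid 0 [])
  let visited0 := (PySem.List.pyRange 0 rows 1).map (fun _ => List.replicate cols.toNat false)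
  let st := (PySem.List.pyRange 0 rows 1).foldl (fun st r =>
    (PySem.List.pyRange 0 cols 1).foldl (fun st c =>
      if pvGridAt grid r c = 1 ∧ pvVisAt st.1 r c = false then
        let res := pvDfs grid (rows.toNat * cols.toNat + 1) r c (st.1, [])
        (res.1, st.2 ++ [res.2])
      else st) st) (visited0, ([] : List (List (Int × Int))))
  st.2

def count_matched_regions (grid1 : List (List Int)) (grid2 : List (List Int)) : Int :=
  let regions1 := pvGetRegions grid1
  let regions2 := pvGetRegions grid2
  regions1.foldl (fun acc r1 =>
    regions2.foldl (fun acc r2 =>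
      if PySem.Set.equal (PySem.Set.ofList r1) (PySem.Set.ofList r2) then acc + 1 else acc)
      acc) 0

-- ===== PORT B =====
-- explicit-stack flood fill (head of the list = top of the Python stack);
-- the fuel only makes the loop total (never exhausted at the caller's value)
def pvFlood (grid : List (List Int)) :
    Nat → List (Int × Int) → List (List Bool) × List (Int × Int) →
    List (List Bool) × List (Int × Int)
  | 0, _, vr => vr
  | _ + 1, [], vr => vr
  | fuel + 1, (r, c) :: rest, vr =>
    if 0 ≤ r ∧ r < PySem.List.len grid ∧ 0 ≤ c ∧
        c < PySem.List.len (PySem.List.pyGetD grid 0 []) ∧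
        pvGridAt grid r c ≠ 0 ∧ pvVisAt vr.1 r c = false then
      pvFlood grid fuel ((r - 1, c) :: (r + 1, c) :: (r, c - 1) :: (r, c + 1) :: rest)
        (pvVisSet vr.1 r c, vr.2 ++ [(r, c)])
    else
      pvFlood grid fuel rest vr

def pvRegionsOf (grid : List (List Int)) : List (List (Int × Int)) :=
  let rows := PySem.List.len grid
  let cols := PySem.List.len (PySem.List.pyGetD grid 0 [])
  let visited0 := (PySem.List.pyRange 0 rows 1).map (fun _ => List.replicate cols.toNat false)
  let st := (PySem.List.pyRange 0 rows 1).foldl (fun st r =>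
    (PySem.List.pyRange 0 cols 1).foldl (fun st c =>
      if pvGridAt grid r c = 1 ∧ pvVisAt st.1 r c = false then
        let res := pvFlood grid (4 * (rows.toNat * cols.toNat) + 2) [(r, c)] (st.1, [])
        (res.1, st.2 ++ [res.2])
      else st) st) (visited0, ([] : List (List (Int × Int))))
  st.2

-- tuple(sorted(set(region))) — Python sorts tuples lexicographically
def pvCanon (reg : List (Int × Int)) : List (Int × Int) :=
  PySem.List.sorted2 (PySem.Set.ofList reg) (fun x => x.1) (fun x => x.2) false

def count_matched_regions_alt (grid1 : List (List Int)) (grid2 : List (List Int)) : Int :=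
  let counts2 := (pvRegionsOf grid2).foldl
    (fun d reg => d.insert (pvCanon reg) (d.getD (pvCanon reg) 0 + 1))
    (PySem.Dict.empty : PySem.Dict (List (Int × Int)) Int)
  ((pvRegionsOf grid1).map (fun reg => counts2.getD (pvCanon reg) 0)).sum

-- ===== PRECONDITION & SPEC =====
-- Pre_ excludes exactly the inputs on which Python A raises IndexError: an empty
-- grid (grid[0]) or a grid with a row shorter than its first row (grid[row][col]);
-- Python B raises there as well.
def Pre_count_matched_regions (grid1 : List (List Int)) (grid2 : List (List Int)) : Prop :=
  grid1 ≠ [] ∧ grid2 ≠ [] ∧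
  (∀ row ∈ grid1, (grid1.headD []).length ≤ row.length) ∧
  (∀ row ∈ grid2, (grid2.headD []).length ≤ row.length)
instance (grid1 : List (List Int)) (grid2 : List (List Int)) : Decidable (Pre_count_matched_regions grid1 grid2) := by unfold Pre_count_matched_regions; infer_instance

def pvWitness_count_matched_regions : List (List Int) × List (List Int) :=
  ([[1, 0], [0, 1]], [[1, 1], [0, 0]])

def Spec_count_matched_regions (grid1 : List (List Int)) (grid2 : List (List Int)) (out : Int) : Prop := out = count_matched_regions_alt grid1 grid2
instance (grid1 : List (List Int)) (grid2 : List (List Int)) (out : Int) : Decidable (Spec_count_matched_regions grid1 grid2 out) := by unfold Spec_count_matched_regions; infer_instance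

-- ===== CLAIM (what is proved, stated in full; the proofs are below) =====
def Claim_equal_count_matched_regions : Prop := ∀ (grid1 : List (List Int)) (grid2 : List (List Int)), Dom_count_matched_regions grid1 grid2 → Pre_count_matched_regions grid1 grid2 → Spec_count_matched_regions grid1 grid2 (count_matched_regions grid1 grid2)

-- ===== LEMMAS AND PROOFS =====

-- number of still-unvisited cells
def pvFalse (v : List (List Bool)) : Nat := (v.map (fun row => row.count false)).sum

-- the visited matrix has the grid's dimensions
def pvInv (g : List (List Int)) (v : List (List Bool)) : Prop :=
  v.length = g.length ∧ ∀ row ∈ v, row.length = (g.headD []).length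

theorem pvLen_head (g : List (List Int)) :
    PySem.List.len (PySem.List.pyGetD g 0 []) = ((g.headD []).length : Int) := by
  cases g <;> simp [PySem.List.pyGetD_zero, PySem.List.len_eq, List.getD]

theorem pv_count_set_true_le (l : List Bool) (n : Nat) :
    (l.set n true).count false ≤ l.count false := by
  induction l generalizing n with
  | nil => simp
  | cons a l ih =>
    cases n with
    | zero => cases a <;> simp
    | succ n => cases a <;> simpa [List.count_cons] using ih n

theorem pv_count_set_true_strict (l : List Bool) (n : Nat) (h : n < l.length)
    (hf : l[n] = false) : (l.set n true).count false + 1 = l.count false := by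
  induction l generalizing n with
  | nil => simp at h
  | cons a l ih =>
    cases n with
    | zero => simp at hf; subst hf; simp
    | succ n =>
      have h' : n < l.length := by simpa using h
      have hf' : l[n] = false := by simpa using hf
      cases a <;> simpa [List.count_cons] using ih n h' hf'

theorem pv_sum_map_set {α : Type} (f : α → Nat) (v : List α) (j : Nat) (w : α)
    (h : j < v.length) :
    ((v.set j w).map f).sum + f (v[j]) = (v.map f).sum + f w := by
  induction v generalizing j with
  | nil => simp at h
  | cons a v ih =>
    cases j with
    | zero => simp; omega
    | succ j =>
      simp at h
      have := ih j h
      simp at *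
      omega

theorem pvFalse_visSet_le (v : List (List Bool)) (r c : Int) (hr : 0 ≤ r) :
    pvFalse (pvVisSet v r c) ≤ pvFalse v := by
  unfold pvVisSet
  rw [PySem.List.pySetD_of_nonneg _ _ hr]
  by_cases hlt : r.toNat < v.length
  · have hget : PySem.List.pyGetD v r [] = v[r.toNat] :=
      PySem.List.pyGetD_eq_getElem v [] hr (by exact_mod_cast by omega)
    have hle : (PySem.List.pySetD (PySem.List.pyGetD v r []) c true).count false
        ≤ (v[r.toNat]).count false := by
      rw [hget]
      by_cases hc : 0 ≤ c
      · rw [PySem.List.pySetD_of_nonneg _ _ hc]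
        exact pv_count_set_true_le _ _
      · unfold PySem.List.pySetD
        cases hs : PySem.List.pySet? (v[r.toNat]) c true with
        | none => simp
        | some l =>
          have hex : ∃ m, l = (v[r.toNat]).set m true := by
            unfold PySem.List.pySet? at hs
            cases hidx : PySem.List.pyIdx? (v[r.toNat]).length c with
            | none => rw [hidx] at hs; simp at hs
            | some m => rw [hidx] at hs; simp at hs; exact ⟨m, hs.symm⟩
          obtain ⟨m, rfl⟩ := hex
          simp only [Option.getD_some]
          exact pv_count_set_true_le _ _
    have hsum := pv_sum_map_set (fun row => row.count false) v r.toNat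
      (PySem.List.pySetD (PySem.List.pyGetD v r []) c true) hlt
    unfold pvFalse
    simp only at hsum
    omega
  · rw [List.set_eq_of_length_le (by omega)]

theorem pvFalse_visSet_strict (g : List (List Int)) (v : List (List Bool)) (r c : Int)
    (hInv : pvInv g v) (hr : 0 ≤ r) (hrlt : r < (g.length : Int)) (hc : 0 ≤ c)
    (hclt : c < ((g.headD []).length : Int)) (hvis : pvVisAt v r c = false) :
    pvFalse (pvVisSet v r c) + 1 = pvFalse v := by
  obtain ⟨hlen, hrow⟩ := hInv
  have hjr : r.toNat < v.length := by omega
  have hget : PySem.List.pyGetD v r [] = v[r.toNat] :=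
    PySem.List.pyGetD_eq_getElem v [] hr (by exact_mod_cast by omega)
  have hrowlen : (v[r.toNat]).length = (g.headD []).length :=
    hrow _ (List.getElem_mem hjr)
  have hjc : c.toNat < (v[r.toNat]).length := by omega
  have hvis' : (v[r.toNat])[c.toNat] = false := by
    unfold pvVisAt at hvis
    rwa [hget, PySem.List.pyGetD_eq_getElem _ _ hc (by exact_mod_cast by omega)] at hvis
  unfold pvVisSet
  rw [PySem.List.pySetD_of_nonneg _ _ hr, hget, PySem.List.pySetD_of_nonneg _ _ hc]
  have hsum := pv_sum_map_set (fun row => row.count false) v r.toNat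
    ((v[r.toNat]).set c.toNat true) hjr
  have hstr := pv_count_set_true_strict (v[r.toNat]) c.toNat hjc hvis'
  unfold pvFalse
  simp only at hsum
  omega

theorem pvInv_visSet (g : List (List Int)) (v : List (List Bool)) (r c : Int)
    (h : pvInv g v) (hr : 0 ≤ r) : pvInv g (pvVisSet v r c) := by
  obtain ⟨hlen, hrow⟩ := h
  unfold pvVisSet
  rw [PySem.List.pySetD_of_nonneg _ _ hr]
  by_cases hlt : r.toNat < v.length
  · refine ⟨by simpa using hlen, ?_⟩
    intro row hmem
    rcases List.mem_or_eq_of_mem_set hmem with hold | hnew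
    · exact hrow _ hold
    · subst hnew
      rw [PySem.List.length_pySetD]
      have hget : PySem.List.pyGetD v r [] = v[r.toNat] :=
        PySem.List.pyGetD_eq_getElem v [] hr (by exact_mod_cast by omega)
      rw [hget]
      exact hrow _ (List.getElem_mem hlt)
  · rw [List.set_eq_of_length_le (by omega)]
    exact ⟨hlen, hrow⟩

theorem pvFalse_le_inv (g : List (List Int)) (v : List (List Bool)) (h : pvInv g v) :
    pvFalse v ≤ g.length * (g.headD []).length := by
  obtain ⟨hlen, hrow⟩ := h
  unfold pvFalse
  calc (v.map (fun row => row.count false)).sum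
      ≤ (v.map (fun _ => (g.headD []).length)).sum := by
        apply List.sum_le_sum
        intro row hmem
        rw [← hrow row hmem]
        exact List.count_le_length
    _ = v.length * (g.headD []).length := by
        simp [List.map_const', List.sum_replicate, smul_eq_mul]
    _ = g.length * (g.headD []).length := by rw [hlen]

theorem pvHead_eq (g : List (List Int)) : PySem.List.pyGetD g 0 [] = g.headD [] := by
  cases g <;> simp [PySem.List.pyGetD_zero, List.getD]

-- A's guard is the exact negation of B's condition
theorem pvGuard_iff (g : List (List Int)) (v : List (List Bool)) (r c : Int) :
    (0 ≤ r ∧ r < PySem.List.len g ∧ 0 ≤ c ∧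
      c < PySem.List.len (PySem.List.pyGetD g 0 []) ∧
      pvGridAt g r c ≠ 0 ∧ pvVisAt v r c = false)
    ↔ ¬ (r < 0 ∨ r ≥ PySem.List.len g ∨ c < 0 ∨
      c ≥ PySem.List.len (PySem.List.pyGetD g 0 []) ∨
      pvGridAt g r c = 0 ∨ pvVisAt v r c = true) := by
  constructor
  · rintro ⟨h1, h2, h3, h4, h5, h6⟩ hor
    rcases hor with h | h | h | h | h | h
    · omega
    · omega
    · omega
    · omega
    · exact h5 h
    · rw [h6] at h; exact Bool.false_ne_true h
  · intro h
    refine ⟨?_, ?_, ?_, ?_, ?_, ?_⟩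
    · by_contra hx; exact h (Or.inl (by omega))
    · by_contra hx; exact h (Or.inr (Or.inl (by omega)))
    · by_contra hx; exact h (Or.inr (Or.inr (Or.inl (by omega))))
    · by_contra hx; exact h (Or.inr (Or.inr (Or.inr (Or.inl (by omega)))))
    · intro hx; exact h (Or.inr (Or.inr (Or.inr (Or.inr (Or.inl hx)))))
    · cases hx : pvVisAt v r c
      · rfl
      · exact absurd (Or.inr (Or.inr (Or.inr (Or.inr (Or.inr hx))))) h

-- one-step unfoldings of A's dfs
theorem pvDfs_guard (g : List (List Int)) (f : Nat) (r c : Int)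
    (vr : List (List Bool) × List (Int × Int))
    (h : r < 0 ∨ r ≥ PySem.List.len g ∨ c < 0 ∨
      c ≥ PySem.List.len (PySem.List.pyGetD g 0 []) ∨
      pvGridAt g r c = 0 ∨ pvVisAt vr.1 r c = true) :
    pvDfs g (f + 1) r c vr = vr := by
  rw [pvDfs, if_pos h]

theorem pvDfs_unfold (g : List (List Int)) (f : Nat) (r c : Int)
    (vr : List (List Bool) × List (Int × Int))
    (h : ¬ (r < 0 ∨ r ≥ PySem.List.len g ∨ c < 0 ∨
      c ≥ PySem.List.len (PySem.List.pyGetD g 0 []) ∨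
      pvGridAt g r c = 0 ∨ pvVisAt vr.1 r c = true)) :
    pvDfs g (f + 1) r c vr =
      pvDfs g f r (c + 1) (pvDfs g f r (c - 1) (pvDfs g f (r + 1) c
        (pvDfs g f (r - 1) c (pvVisSet vr.1 r c, vr.2 ++ [(r, c)])))) := by
  rw [pvDfs, if_neg h]

theorem pvDfs_false_le (g : List (List Int)) :
    ∀ (fuel : Nat) (r c : Int) (vr : List (List Bool) × List (Int × Int)),
    pvFalse (pvDfs g fuel r c vr).1 ≤ pvFalse vr.1 := by
  intro fuel
  induction fuel with
  | zero => intro r c vr; simp [pvDfs]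
  | succ fuel ih =>
    intro r c vr
    rw [pvDfs]
    split
    · exact le_refl _
    · rename_i hguard
      have hr : 0 ≤ r := by by_contra h; exact hguard (Or.inl (by omega))
      calc pvFalse (pvDfs g fuel r (c+1) _).1
          ≤ _ := ih _ _ _
        _ ≤ _ := ih _ _ _
        _ ≤ _ := ih _ _ _
        _ ≤ _ := ih _ _ _
        _ ≤ pvFalse vr.1 := pvFalse_visSet_le vr.1 r c hr

theorem pvDfs_inv (g : List (List Int)) :
    ∀ (fuel : Nat) (r c : Int) (vr : List (List Bool) × List (Int × Int)),
    pvInv g vr.1 → pvInv g (pvDfs g fuel r c vr).1 := by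
  intro fuel
  induction fuel with
  | zero => intro r c vr h; simpa [pvDfs] using h
  | succ fuel ih =>
    intro r c vr h
    rw [pvDfs]
    split
    · exact h
    · rename_i hguard
      have hr : 0 ≤ r := by by_contra hr; exact hguard (Or.inl (by omega))
      exact ih _ _ _ (ih _ _ _ (ih _ _ _ (ih _ _ _ (pvInv_visSet g vr.1 r c h hr))))

theorem pvDfs_stable (g : List (List Int)) :
    ∀ (n : Nat), ∀ (fa fb : Nat) (r c : Int) (vr : List (List Bool) × List (Int × Int)),
    pvInv g vr.1 → pvFalse vr.1 = n → n < fa → n < fb →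
    pvDfs g fa r c vr = pvDfs g fb r c vr := by
  intro n
  induction n using Nat.strong_induction_on with
  | _ n IH =>
    intro fa fb r c vr hInv hn hfa hfb
    obtain ⟨fa, rfl⟩ : ∃ k, fa = k + 1 := ⟨fa - 1, by omega⟩
    obtain ⟨fb, rfl⟩ : ∃ k, fb = k + 1 := ⟨fb - 1, by omega⟩
    rw [pvDfs, pvDfs]
    split
    · rfl
    · rename_i hguard
      obtain ⟨hr, hrlt, hc, hclt, _, hvis⟩ := (pvGuard_iff g vr.1 r c).mpr hguard
      rw [PySem.List.len_eq] at hrlt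
      rw [pvLen_head] at hclt
      have hst1false : pvFalse (pvVisSet vr.1 r c, vr.2 ++ [(r, c)]).1 + 1 = n := by
        rw [← hn]; exact pvFalse_visSet_strict g vr.1 r c hInv hr hrlt hc hclt hvis
      have hst1inv : pvInv g (pvVisSet vr.1 r c, vr.2 ++ [(r, c)]).1 :=
        pvInv_visSet g vr.1 r c hInv hr
      simp only
      set st1 := (pvVisSet vr.1 r c, vr.2 ++ [(r, c)]) with hst1def
      have h1 : pvDfs g fa (r-1) c st1 = pvDfs g fb (r-1) c st1 :=
        IH (pvFalse st1.1) (by omega) fa fb _ _ _ hst1inv rfl (by omega) (by omega)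
      rw [h1]
      set s1 := pvDfs g fb (r-1) c st1 with hs1
      have hs1le : pvFalse s1.1 ≤ pvFalse st1.1 := pvDfs_false_le g fb _ _ _
      have hs1inv : pvInv g s1.1 := pvDfs_inv g fb _ _ _ hst1inv
      have h2 : pvDfs g fa (r+1) c s1 = pvDfs g fb (r+1) c s1 :=
        IH (pvFalse s1.1) (by omega) fa fb _ _ _ hs1inv rfl (by omega) (by omega)
      rw [h2]
      set s2 := pvDfs g fb (r+1) c s1 with hs2
      have hs2le : pvFalse s2.1 ≤ pvFalse s1.1 := pvDfs_false_le g fb _ _ _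
      have hs2inv : pvInv g s2.1 := pvDfs_inv g fb _ _ _ hs1inv
      have h3 : pvDfs g fa r (c-1) s2 = pvDfs g fb r (c-1) s2 :=
        IH (pvFalse s2.1) (by omega) fa fb _ _ _ hs2inv rfl (by omega) (by omega)
      rw [h3]
      set s3 := pvDfs g fb r (c-1) s2 with hs3
      have hs3le : pvFalse s3.1 ≤ pvFalse s2.1 := pvDfs_false_le g fb _ _ _
      have hs3inv : pvInv g s3.1 := pvDfs_inv g fb _ _ _ hs2inv
      exact IH (pvFalse s3.1) (by omega) fa fb _ _ _ hs3inv rfl (by omega) (by omega)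

-- B's stack loop runs A's dfs on each stack entry in turn
theorem pvFlood_eq (g : List (List Int)) :
    ∀ (fb : Nat) (stack : List (Int × Int)) (vr : List (List Bool) × List (Int × Int)),
    pvInv g vr.1 → 4 * pvFalse vr.1 + stack.length < fb →
    pvFlood g fb stack vr =
      stack.foldl (fun st p => pvDfs g (pvFalse st.1 + 1) p.1 p.2 st) vr := by
  intro fb
  induction fb with
  | zero => intro stack vr _ h; omega
  | succ fb ih =>
    intro stack vr hInv hsz
    match stack with
    | [] => rw [pvFlood]; rfl
    | (r, c) :: rest =>
      rw [pvFlood]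
      by_cases hB : 0 ≤ r ∧ r < PySem.List.len g ∧ 0 ≤ c ∧
          c < PySem.List.len (PySem.List.pyGetD g 0 []) ∧
          pvGridAt g r c ≠ 0 ∧ pvVisAt vr.1 r c = false
      · rw [if_pos hB]
        obtain ⟨hr, hrlt, hc, hclt, _, hvis⟩ := hB
        have hrlt' : r < (g.length : Int) := by rwa [PySem.List.len_eq] at hrlt
        have hclt' : c < ((g.headD []).length : Int) := by rwa [pvLen_head] at hclt
        set st1 := (pvVisSet vr.1 r c, vr.2 ++ [(r, c)]) with hst1def
        have hstrict : pvFalse st1.1 + 1 = pvFalse vr.1 :=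
          pvFalse_visSet_strict g vr.1 r c hInv hr hrlt' hc hclt' hvis
        have hst1inv : pvInv g st1.1 := pvInv_visSet g vr.1 r c hInv hr
        rw [ih _ _ hst1inv (by simp at hsz ⊢; omega)]
        simp only [List.foldl_cons]
        congr 1
        have hguard' : ¬ (r < 0 ∨ r ≥ PySem.List.len g ∨ c < 0 ∨
            c ≥ PySem.List.len (PySem.List.pyGetD g 0 []) ∨
            pvGridAt g r c = 0 ∨ pvVisAt vr.1 r c = true) :=
          (pvGuard_iff g vr.1 r c).mp
            ⟨hr, hrlt, hc, hclt, by assumption, hvis⟩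
        rw [show pvFalse vr.1 + 1 = (pvFalse st1.1 + 1) + 1 by omega]
        rw [pvDfs_unfold g (pvFalse st1.1 + 1) r c vr hguard']
        rw [← hst1def]
        set s1 := pvDfs g (pvFalse st1.1 + 1) (r - 1) c st1 with hs1
        have hs1le : pvFalse s1.1 ≤ pvFalse st1.1 := by
          rw [hs1]; exact pvDfs_false_le g _ _ _ _
        have hs1inv : pvInv g s1.1 := by
          rw [hs1]; exact pvDfs_inv g _ _ _ _ hst1inv
        rw [pvDfs_stable g (pvFalse s1.1) (pvFalse st1.1 + 1) (pvFalse s1.1 + 1)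
          (r + 1) c s1 hs1inv rfl (by omega) (by omega)]
        set s2 := pvDfs g (pvFalse s1.1 + 1) (r + 1) c s1 with hs2
        have hs2le : pvFalse s2.1 ≤ pvFalse s1.1 := by
          rw [hs2]; exact pvDfs_false_le g _ _ _ _
        have hs2inv : pvInv g s2.1 := by
          rw [hs2]; exact pvDfs_inv g _ _ _ _ hs1inv
        rw [pvDfs_stable g (pvFalse s2.1) (pvFalse st1.1 + 1) (pvFalse s2.1 + 1)
          r (c - 1) s2 hs2inv rfl (by omega) (by omega)]
        set s3 := pvDfs g (pvFalse s2.1 + 1) r (c - 1) s2 with hs3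
        have hs3le : pvFalse s3.1 ≤ pvFalse s2.1 := by
          rw [hs3]; exact pvDfs_false_le g _ _ _ _
        have hs3inv : pvInv g s3.1 := by
          rw [hs3]; exact pvDfs_inv g _ _ _ _ hs2inv
        rw [pvDfs_stable g (pvFalse s3.1) (pvFalse st1.1 + 1) (pvFalse s3.1 + 1)
          r (c + 1) s3 hs3inv rfl (by omega) (by omega)]
      · rw [if_neg hB]
        rw [ih _ _ hInv (by simp at hsz ⊢; omega)]
        simp only [List.foldl_cons]
        congr 1
        have hguard : r < 0 ∨ r ≥ PySem.List.len g ∨ c < 0 ∨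
            c ≥ PySem.List.len (PySem.List.pyGetD g 0 []) ∨
            pvGridAt g r c = 0 ∨ pvVisAt vr.1 r c = true := by
          by_contra hg
          exact hB ((pvGuard_iff g vr.1 r c).mpr hg)
        exact (pvDfs_guard g (pvFalse vr.1) r c vr hguard).symm

theorem pvFlood_inv (g : List (List Int)) :
    ∀ (fuel : Nat) (stack : List (Int × Int)) (vr : List (List Bool) × List (Int × Int)),
    pvInv g vr.1 → pvInv g (pvFlood g fuel stack vr).1 := by
  intro fuel
  induction fuel with
  | zero => intro stack vr h; simpa [pvFlood] using h
  | succ fuel ih =>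
    intro stack vr h
    match stack with
    | [] => rw [pvFlood]; exact h
    | (r, c) :: rest =>
      rw [pvFlood]
      by_cases hB : 0 ≤ r ∧ r < PySem.List.len g ∧ 0 ≤ c ∧
          c < PySem.List.len (PySem.List.pyGetD g 0 []) ∧
          pvGridAt g r c ≠ 0 ∧ pvVisAt vr.1 r c = false
      · rw [if_pos hB]
        exact ih _ _ (pvInv_visSet g vr.1 r c h hB.1)
      · rw [if_neg hB]
        exact ih _ _ h

-- generic foldl congruence-- generic foldl congruence under an invariant
theorem pv_foldl_congr_inv {α β : Type} (P : β → Prop) (f h : β → α → β) :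
    ∀ (l : List α) (st : β), P st → (∀ st x, P st → f st x = h st x) →
    (∀ st x, P st → P (f st x)) → l.foldl f st = l.foldl h st := by
  intro l
  induction l with
  | nil => intro st _ _ _; rfl
  | cons x l ih =>
    intro st hP hfg hpres
    simp only [List.foldl_cons]
    rw [← hfg st x hP]
    exact ih (f st x) (hpres st x hP) hfg hpres

theorem pv_foldl_pres {α β : Type} (P : β → Prop) (f : β → α → β) :
    ∀ (l : List α) (st : β), P st → (∀ st x, P st → P (f st x)) → P (l.foldl f st) := by
  intro l
  induction l with
  | nil => intro st hP _; exact hP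
  | cons x l ih =>
    intro st hP hpres
    exact ih (f st x) (hpres st x hP) hpres

-- the two region extractions return the same list of regions
theorem pvRegions_eq (g : List (List Int)) : pvRegionsOf g = pvGetRegions g := by
  unfold pvRegionsOf pvGetRegions
  simp only [PySem.List.len_eq, pvHead_eq, Int.toNat_natCast]
  apply congrArg Prod.snd
  refine pv_foldl_congr_inv (fun (st : List (List Bool) × List (List (Int × Int))) => pvInv g st.1) _ _ _ _ ?_ ?_ ?_
  · -- initial visited matrix satisfies the invariant
    refine ⟨by simp [PySem.List.length_pyRange_one], ?_⟩
    intro row hmem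
    simp only [List.mem_map] at hmem
    obtain ⟨_, _, rfl⟩ := hmem
    simp
  · -- the inner folds agree pointwise under the invariant
    intro st r hP
    refine pv_foldl_congr_inv (fun (st : List (List Bool) × List (List (Int × Int))) => pvInv g st.1) _ _ _ _ hP ?_ ?_
    · intro st c hP
      by_cases hcond : pvGridAt g r c = 1 ∧ pvVisAt st.1 r c = false
      · rw [if_pos hcond, if_pos hcond]
        have hP0 : pvInv g ((st.1, ([] : List (Int × Int))).1) := hP
        have hle : pvFalse st.1 ≤ g.length * (g.headD []).length := pvFalse_le_inv g st.1 hP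
        have hflood : pvFlood g (4 * (g.length * (g.headD []).length) + 2) [(r, c)]
            (st.1, ([] : List (Int × Int)))
            = pvDfs g (g.length * (g.headD []).length + 1) r c
              (st.1, ([] : List (Int × Int))) := by
          rw [pvFlood_eq g _ _ _ hP0 (by simp only [List.length_cons, List.length_nil]; omega)]
          simp only [List.foldl_cons, List.foldl_nil]
          exact pvDfs_stable g (pvFalse st.1) _ _ r c (st.1, []) hP0 rfl
            (by omega) (by omega)
        rw [hflood]
      · rw [if_neg hcond, if_neg hcond]
    · intro st c hP
      by_cases hcond : pvGridAt g r c = 1 ∧ pvVisAt st.1 r c = false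
      · rw [if_pos hcond]
        exact pvFlood_inv g _ _ _ hP
      · rwa [if_neg hcond]
  · -- the inner fold preserves the invariant
    intro st r hP
    refine pv_foldl_pres (fun (st : List (List Bool) × List (List (Int × Int))) => pvInv g st.1) _ _ _ hP ?_
    intro st c hP
    by_cases hcond : pvGridAt g r c = 1 ∧ pvVisAt st.1 r c = false
    · rw [if_pos hcond]
      exact pvFlood_inv g _ _ _ hP
    · rwa [if_neg hcond]

-- ===== counting side =====

def pvLt (a b : Int × Int) : Prop := a.1 < b.1 ∨ (a.1 = b.1 ∧ a.2 < b.2)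

def pvBf (a b : Int × Int) : Bool :=
  decide (a.1 < b.1) || (!decide (b.1 < a.1) && decide (a.2 < b.2))

theorem pvBf_iff (a b : Int × Int) : pvBf a b = true ↔ pvLt a b := by
  simp [pvBf, pvLt]; omega

theorem pvLt_trans {a b c : Int × Int} (h1 : pvLt a b) (h2 : pvLt b c) : pvLt a c := by
  unfold pvLt at *; omega

theorem pvLt_asymm {a b : Int × Int} (h : pvLt a b) : ¬ pvLt b a := by
  unfold pvLt at *; omega

theorem pvLt_total {a b : Int × Int} (h : a ≠ b) : pvLt a b ∨ pvLt b a := by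
  obtain ⟨a1, a2⟩ := a; obtain ⟨b1, b2⟩ := b
  simp only [Ne, Prod.mk.injEq, not_and] at h
  unfold pvLt
  simp only
  by_cases h1 : a1 = b1
  · subst h1
    have := h rfl
    omega
  · omega

theorem pv_insertBy_pairwise (x : Int × Int) :
    ∀ (ys : List (Int × Int)), ys.Pairwise pvLt → x ∉ ys →
    (PySem.List.insertBy pvBf x ys).Pairwise pvLt := by
  intro ys
  induction ys with
  | nil => intro _ _; simp [PySem.List.insertBy]
  | cons y ys ih =>
    intro hp hx
    rw [List.pairwise_cons] at hp
    obtain ⟨hy, hys⟩ := hp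
    rw [PySem.List.insertBy]
    by_cases hbf : pvBf x y = true
    · rw [if_pos hbf]
      have hxy : pvLt x y := (pvBf_iff x y).mp hbf
      refine List.Pairwise.cons ?_ (List.Pairwise.cons hy hys)
      intro z hz
      rcases List.mem_cons.mp hz with rfl | hz
      · exact hxy
      · exact pvLt_trans hxy (hy z hz)
    · rw [if_neg hbf]
      have hyx : pvLt y x := by
        have hne : x ≠ y := by
          intro he; exact hx (he ▸ List.mem_cons_self)
        rcases pvLt_total hne with h | h
        · exact absurd ((pvBf_iff x y).mpr h) hbf
        · exact h
      refine List.Pairwise.cons ?_ (ih hys (fun hm => hx (List.mem_cons_of_mem _ hm)))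
      intro z hz
      rcases (PySem.List.mem_insertBy pvBf x z ys).mp hz with rfl | hz
      · exact hyx
      · exact hy z hz

theorem pv_foldl_insertBy_pairwise :
    ∀ (l acc : List (Int × Int)), l.Nodup → acc.Pairwise pvLt → (∀ x ∈ l, x ∉ acc) →
    (l.foldl (fun acc x => PySem.List.insertBy pvBf x acc) acc).Pairwise pvLt := by
  intro l
  induction l with
  | nil => intro acc _ h _; exact h
  | cons x l ih =>
    intro acc hnd hacc hdisj
    rw [List.nodup_cons] at hnd
    simp only [List.foldl_cons]
    apply ih _ hnd.2 (pv_insertBy_pairwise x acc hacc (hdisj x List.mem_cons_self))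
    intro y hy hmem
    rcases (PySem.List.mem_insertBy pvBf x y acc).mp hmem with rfl | hmem
    · exact hnd.1 hy
    · exact hdisj y (List.mem_cons_of_mem _ hy) hmem

theorem pvCanon_unfold (r : List (Int × Int)) :
    pvCanon r = (PySem.Set.ofList r).foldl (fun acc x => PySem.List.insertBy pvBf x acc) [] := by
  rfl

theorem pvCanon_pairwise (r : List (Int × Int)) : (pvCanon r).Pairwise pvLt := by
  rw [pvCanon_unfold]
  exact pv_foldl_insertBy_pairwise _ [] (PySem.Set.nodup_ofList r) List.Pairwise.nil
    (by simp)

theorem pvCanon_perm (r : List (Int × Int)) : (pvCanon r).Perm (PySem.Set.ofList r) :=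
  PySem.List.sorted2_perm _ _ _ _

theorem pv_mem_canon (r : List (Int × Int)) (x : Int × Int) :
    x ∈ pvCanon r ↔ x ∈ r :=
  ((pvCanon_perm r).mem_iff).trans (PySem.Set.mem_ofList r x)

theorem pvCanon_eq_iff (r1 r2 : List (Int × Int)) :
    pvCanon r1 = pvCanon r2 ↔ ∀ x, x ∈ r1 ↔ x ∈ r2 := by
  constructor
  · intro h x
    rw [← pv_mem_canon r1, ← pv_mem_canon r2, h]
  · intro h
    apply List.eq_of_perm_of_sorted
      (fun a b _ _ hab hba => absurd hba (pvLt_asymm hab))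
      (pvCanon_pairwise r1) (pvCanon_pairwise r2)
    refine ((pvCanon_perm r1).trans ?_).trans (pvCanon_perm r2).symm
    exact (List.perm_ext_iff_of_nodup (PySem.Set.nodup_ofList r1)
      (PySem.Set.nodup_ofList r2)).mpr
      (fun a => (PySem.Set.mem_ofList r1 a).trans
        ((h a).trans (PySem.Set.mem_ofList r2 a).symm))

theorem pvSetEqual_iff (r1 r2 : List (Int × Int)) :
    PySem.Set.equal (PySem.Set.ofList r1) (PySem.Set.ofList r2) = true ↔
    ∀ x, x ∈ r1 ↔ x ∈ r2 := by
  simp only [PySem.Set.equal, PySem.Set.issubset, PySem.Set.contains, Bool.and_eq_true,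
    List.all_eq_true, List.contains_iff_mem, PySem.Set.mem_ofList]
  constructor
  · rintro ⟨h1, h2⟩ x
    exact ⟨fun hx => by simpa [PySem.Set.mem_ofList] using h1 x (by simpa [PySem.Set.mem_ofList] using hx),
           fun hx => by simpa [PySem.Set.mem_ofList] using h2 x (by simpa [PySem.Set.mem_ofList] using hx)⟩
  · intro h
    constructor
    · intro x hx
      exact (h x).mp hx
    · intro x hx
      exact (h x).mpr hx

theorem pvCounterD (l : List (List (Int × Int))) (k : List (Int × Int)) :
    (l.foldl (fun d reg => d.insert (pvCanon reg) (d.getD (pvCanon reg) 0 + 1))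
      (PySem.Dict.empty : PySem.Dict (List (Int × Int)) Int)).getD k 0
    = ((l.map pvCanon).count k : Int) := by
  have hmap : (l.map pvCanon).foldl (fun d k => d.insert k (d.getD k 0 + 1))
      (PySem.Dict.empty : PySem.Dict (List (Int × Int)) Int)
      = l.foldl (fun d reg => d.insert (pvCanon reg) (d.getD (pvCanon reg) 0 + 1))
        (PySem.Dict.empty : PySem.Dict (List (Int × Int)) Int) := List.foldl_map
  rw [← hmap, PySem.Dict.getD_foldl_insert_add_one, PySem.Dict.getD_empty]
  simp

-- ===== VERDICT (by name: the statement is the Claim_ definition above) =====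
theorem count_matched_regions_spec : Claim_equal_count_matched_regions := by
  intro g1 g2 _ _
  unfold Spec_count_matched_regions count_matched_regions count_matched_regions_alt
  rw [pvRegions_eq g1, pvRegions_eq g2]
  simp only
  set R1 := pvGetRegions g1
  set R2 := pvGetRegions g2
  have hinner : ∀ (acc : Int) (r1 : List (Int × Int)),
      R2.foldl (fun acc r2 =>
        if PySem.Set.equal (PySem.Set.ofList r1) (PySem.Set.ofList r2) then acc + 1 else acc) acc
      = acc + ((R2.countP (fun r2 =>
          PySem.Set.equal (PySem.Set.ofList r1) (PySem.Set.ofList r2)) : Nat) : Int) :=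
    fun acc r1 => PySem.List.foldl_count_if _ _ _
  rw [PySem.List.foldl_congr_mem R1 _
    (fun acc r1 => acc + ((R2.countP (fun r2 =>
      PySem.Set.equal (PySem.Set.ofList r1) (PySem.Set.ofList r2)) : Nat) : Int)) 0
    (fun acc x _ => hinner acc x)]
  rw [PySem.List.foldl_add R1 _ 0, zero_add]
  apply congrArg List.sum
  apply List.map_congr_left
  intro r1 _
  rw [pvCounterD R2 (pvCanon r1)]
  congr 1
  rw [List.count_eq_countP, List.countP_map]
  apply List.countP_congr
  intro r2 _
  simp only [Function.comp_apply, beq_iff_eq]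
  rw [pvSetEqual_iff, pvCanon_eq_iff]
  exact ⟨fun h x => (h x).symm, fun h x => (h x).symm⟩
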